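-- pv_equiv track=rewrite | github.com/daniel-reich/ubiquitous-fiesta | EuHGfJfCeLyx9BEdG_7.py | party_people
-- ===== SOURCE A (Python) =====
-- def party_people(lst):
--   lst=sorted(lst)
--   if lst:
--     if lst[-1]<=len(lst):
--       return len(lst)
--     else:
--       return party_people(lst[:-1])
--   else:
--     return 0
-- ===== SOURCE B (Python) =====
-- def party_people(lst):
--     s = sorted(lst)
--     for k in range(len(s), 0, -1):
--         if s[k - 1] <= k:
--             return k
--     return 0
-- ===== Notes on version B (the rewrite author's own statement) =====
-- stated objective: faster
-- what changed: A recursively re-sorts and drops the last element until max <= length; B sorts once and scans k downward for the largest k with sorted[k-1] <= k.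
import Mathlib
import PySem

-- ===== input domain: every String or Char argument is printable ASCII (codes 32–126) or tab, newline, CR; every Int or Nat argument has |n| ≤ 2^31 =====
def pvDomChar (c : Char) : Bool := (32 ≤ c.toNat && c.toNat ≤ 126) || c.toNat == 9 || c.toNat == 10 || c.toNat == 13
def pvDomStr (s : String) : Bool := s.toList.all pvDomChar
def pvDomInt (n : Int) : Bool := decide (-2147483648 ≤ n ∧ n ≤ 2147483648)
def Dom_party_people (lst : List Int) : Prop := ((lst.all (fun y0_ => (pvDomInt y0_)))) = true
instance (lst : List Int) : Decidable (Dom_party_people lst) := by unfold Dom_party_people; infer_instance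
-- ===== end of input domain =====

-- B sorts once and scans downward instead of A's recursive re-sort-and-drop; objective: faster.

-- ===== PORT A =====
-- A: sort, and if the max exceeds the length, recurse on the sorted list without its last element.
def party_people (lst : List Int) : Int :=
  let s := PySem.List.sorted lst (fun x => x) false
  if s ≠ [] then
    if PySem.List.pyGetD s (-1) 0 ≤ (s.length : Int) then (s.length : Int)
    else party_people (PySem.List.slice s none (some (-1)))
  else 0
termination_by lst.length
decreasing_by
  rename_i hne _
  have h1 : 0 < (PySem.List.sorted lst (fun x => x) false).length :=
    List.length_pos_iff.mpr hne
  simp only [PySem.List.slice_to_neg_one, List.length_dropLast,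
    PySem.List.length_sorted] at *
  omega

-- ===== PORT B =====
-- descending loop: for k in range(len(s), 0, -1): if s[k-1] <= k: return k
def partyGo (s : List Int) : Nat → Int
  | 0 => 0
  | k + 1 => if s.getD k 0 ≤ ((k : Int) + 1) then (k : Int) + 1 else partyGo s k

def party_people_alt (lst : List Int) : Int :=
  let s := PySem.List.sorted lst (fun x => x) false
  partyGo s s.length

-- ===== PRECONDITION & SPEC =====
def Spec_party_people (lst : List Int) (out : Int) : Prop := out = party_people_alt lst
instance (lst : List Int) (out : Int) : Decidable (Spec_party_people lst out) := by unfold Spec_party_people; infer_instance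

-- ===== CLAIM (what is proved, stated in full; the proofs are below) =====
def Claim_equal_party_people : Prop := ∀ (lst : List Int), Dom_party_people lst → Spec_party_people lst (party_people lst)

-- ===== LEMMAS AND PROOFS =====

-- partyGo only looks at indices below its counter
theorem partyGo_congr (s t : List Int) (n : Nat)
    (h : ∀ k < n, s.getD k 0 = t.getD k 0) : partyGo s n = partyGo t n := by
  induction n with
  | zero => rfl
  | succ k ih =>
    simp only [partyGo, h k (Nat.lt_succ_self k)]
    rw [ih (fun j hj => h j (Nat.lt_succ_of_lt hj))]

theorem party_people_eq_alt (n : Nat) : ∀ (lst : List Int), lst.length ≤ n →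
    party_people lst = party_people_alt lst := by
  induction n with
  | zero =>
    intro lst hlen
    have : lst = [] := List.eq_nil_of_length_eq_zero (Nat.le_zero.mp hlen)
    subst this
    simp [party_people, party_people_alt, PySem.List.sorted, partyGo]
  | succ n ih =>
    intro lst hlen
    by_cases hnil : lst = []
    · subst hnil
      rw [party_people.eq_def]
      simp [party_people_alt, PySem.List.sorted, partyGo]
    · set s := PySem.List.sorted lst (fun x => x) false with hs
      have hsne : s ≠ [] := by
        simp [hs, PySem.List.sorted_eq_nil_iff, hnil]
      have hslen : s.length = lst.length := PySem.List.length_sorted ..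
      have hspw : s.Pairwise (· ≤ ·) := by
        simpa [hs] using PySem.List.sorted_pairwise lst (fun x => x)
      -- unfold A one step
      rw [party_people.eq_def]
      simp only [← hs, hsne, if_pos, ne_eq, not_false_eq_true,
        PySem.List.slice_to_neg_one]
      -- obtain s = t ++ [last]
      have hta : s = s.dropLast ++ [s.getLast hsne] :=
        (List.dropLast_append_getLast hsne).symm
      set t := s.dropLast with htdef
      set a := s.getLast hsne with hadef
      have hlast : PySem.List.pyGetD s (-1) 0 = a := by
        rw [hta]; exact PySem.List.pyGetD_neg_one_append_singleton ..
      by_cases hle : PySem.List.pyGetD s (-1) 0 ≤ (s.length : Int)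
      · -- A returns len; B's first test succeeds too
        rw [if_pos hle]
        rw [party_people_alt]
        simp only [← hs]
        cases hn : s.length with
        | zero => exact absurd (List.eq_nil_of_length_eq_zero hn) hsne
        | succ m =>
          have hgd : s.getD m 0 = a := by
            rw [hta]
            have : t.length = m := by
              have := congrArg List.length hta
              simp [hn] at this; omega
            simp [List.getD, ← this]
          rw [partyGo, if_pos]
          · omega
          · rw [hgd, ← hlast]
            have : ((m : Int) + 1) = (s.length : Int) := by rw [hn]; push_cast; ring
            omega
      · -- A recurses on s.dropLast
        rw [if_neg hle]
        have hdl : s.dropLast = t := rfl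
        have htpw : t.Pairwise (· ≤ ·) := by
          rw [← hdl]; exact hspw.sublist (List.dropLast_sublist s)
        have hsortt : PySem.List.sorted t (fun x => x) false = t :=
          PySem.List.sorted_eq_self_of_pairwise t (fun x => x) (by simpa using htpw)
        have htlen : t.length + 1 = s.length := by
          have := congrArg List.length hta; simp at this; omega
        rw [ih t (by omega)]
        -- now both sides are B-style on t vs s
        rw [party_people_alt, party_people_alt]
        simp only [← hs, hsortt]
        cases hn : s.length with
        | zero => exact absurd (List.eq_nil_of_length_eq_zero hn) hsne
        | succ m =>
          have htm : t.length = m := by omega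
          rw [partyGo, if_neg]
          · rw [htm]
            exact partyGo_congr t s m (fun k hk => by
              rw [← hdl]
              simp [List.getD]
              rw [List.getElem?_dropLast]
              rw [if_pos (by omega)]
              )
          · have hgd : s.getD m 0 = a := by
              rw [hta]; simp [List.getD, ← htm]
            rw [hgd, ← hlast]
            have : ((m : Int) + 1) = (s.length : Int) := by rw [hn]; push_cast; ring
            omega

-- ===== VERDICT (by name: the statement is the Claim_ definition above) =====
theorem party_people_spec : Claim_equal_party_people := by
  intro lst _
  unfold Spec_party_people
  exact party_people_eq_alt lst.length lst le_rfl
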